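-- pv_equiv track=rewrite | github.com/lajones86/z-reports | application_files/zr_db.py | fix_timestamp
-- ===== SOURCE A (Python) =====
-- def fix_timestamp(timestamp):
--     timestamp_fixed = ""
--     for char in str(timestamp):
--         if char != "." and char != "\n":
--             timestamp_fixed += char
--         else:
--             break
--     return(int(timestamp_fixed))
-- ===== SOURCE B (Python) =====
-- def fix_timestamp(timestamp):
--     s = str(timestamp)
--     i = s.find(".")
--     j = s.find("\n")
--     if i == -1:
--         i = len(s)
--     if j == -1:
--         j = len(s)
--     return int(s[:min(i, j)])
-- ===== Notes on version B (the rewrite author's own statement) =====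
-- stated objective: simpler
-- what changed: Replaces the char-by-char accumulation loop with locating the first '.'/'\n' via str.find and slicing the prefix once.
import Mathlib
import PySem

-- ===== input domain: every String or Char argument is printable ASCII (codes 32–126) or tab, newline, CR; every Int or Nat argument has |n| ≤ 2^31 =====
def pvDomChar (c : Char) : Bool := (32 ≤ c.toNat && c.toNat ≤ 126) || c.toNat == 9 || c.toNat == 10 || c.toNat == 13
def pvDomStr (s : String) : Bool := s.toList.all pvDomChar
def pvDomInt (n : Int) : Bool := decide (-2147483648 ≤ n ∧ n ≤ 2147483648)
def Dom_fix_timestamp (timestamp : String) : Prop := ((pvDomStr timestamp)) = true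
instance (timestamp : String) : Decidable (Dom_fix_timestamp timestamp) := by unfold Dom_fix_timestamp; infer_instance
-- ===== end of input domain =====

-- B replaces A's char-by-char accumulation loop by finding the first '.'/'\n' and slicing the prefix once (simpler decomposition, same cost).


-- ===== PORT A =====
-- the for-loop with break: accumulate chars until the first '.' or '\n'
def fixLoopA (cs : List Char) (acc : List Char) : List Char :=
  match cs with
  | [] => acc
  | c :: rest => if (c != '.') && (c != '\n') then fixLoopA rest (acc ++ [c]) else acc

def fix_timestamp (timestamp : String) : Int :=
  -- int(timestamp_fixed); Pre_ guarantees the parse succeeds (else Python raises ValueError)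
  (PySem.Int.ofChars? (fixLoopA timestamp.toList [])).getD 0

-- ===== PORT B =====
def fix_timestamp_alt (timestamp : String) : Int :=
  let i := PySem.Str.find timestamp "."
  let j := PySem.Str.find timestamp "\n"
  let i := if i = -1 then (PySem.Str.len timestamp) else i
  let j := if j = -1 then (PySem.Str.len timestamp) else j
  -- int(s[:min(i,j)]); Pre_ guarantees the parse succeeds
  (PySem.Int.ofStr? (PySem.Str.slice timestamp none (some (min i j)))).getD 0

-- ===== PRECONDITION & SPEC =====
-- Pre_ : the prefix of the string before the first '.' or '\n' parses as a Python int
-- (on other inputs A raises ValueError in int()).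
def Pre_fix_timestamp (timestamp : String) : Prop :=
  (PySem.Int.ofChars? (timestamp.toList.takeWhile (fun c => (c != '.') && (c != '\n')))).isSome = true
instance (timestamp : String) : Decidable (Pre_fix_timestamp timestamp) := by
  unfold Pre_fix_timestamp; infer_instance
def pvWitness_fix_timestamp : String := "1626000000.5"

def Spec_fix_timestamp (timestamp : String) (out : Int) : Prop := out = fix_timestamp_alt timestamp
instance (timestamp : String) (out : Int) : Decidable (Spec_fix_timestamp timestamp out) := by unfold Spec_fix_timestamp; infer_instance

-- ===== CLAIM (what is proved, stated in full; the proofs are below) =====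
def Claim_equal_fix_timestamp : Prop := ∀ (timestamp : String), Dom_fix_timestamp timestamp → Pre_fix_timestamp timestamp → Spec_fix_timestamp timestamp (fix_timestamp timestamp)

-- ===== LEMMAS AND PROOFS =====

-- A's loop is takeWhile
theorem fixLoopA_eq (cs : List Char) (acc : List Char) :
    fixLoopA cs acc = acc ++ cs.takeWhile (fun c => (c != '.') && (c != '\n')) := by
  induction cs generalizing acc with
  | nil => simp [fixLoopA]
  | cons c rest ih =>
    cases hc : (c != '.') && (c != '\n') with
    | true => simp [fixLoopA, hc, List.takeWhile, ih]
    | false => simp [fixLoopA, hc, List.takeWhile]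

theorem singleton_prefix_iff (c : Char) (l : List Char) : [c] <+: l ↔ l.head? = some c := by
  constructor
  · rintro ⟨t, rfl⟩; rfl
  · intro h
    cases l with
    | nil => simp at h
    | cons a t => simp at h; exact ⟨t, by simp [h]⟩

theorem tw_len (q : Char → Bool) : ∀ (s : List Char) (k : Nat),
    (∀ i, i < k → ∀ x, s[i]? = some x → q x = true) →
    (∀ x, s[k]? = some x → q x = false) →
    k ≤ s.length →
    (s.takeWhile q).length = k := by
  intro s
  induction s with
  | nil => intro k _ _ hk; simp at hk; simp [hk]
  | cons a t ih =>
    intro k h1 h2 hk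
    cases k with
    | zero =>
      have := h2 a (by simp)
      simp [List.takeWhile, this]
    | succ k =>
      have ha : q a = true := h1 0 (by omega) a (by simp)
      have : (t.takeWhile q).length = k := by
        apply ih
        · intro i hi x hx
          exact h1 (i+1) (by omega) x (by simpa using hx)
        · intro x hx
          exact h2 x (by simpa using hx)
        · simpa using Nat.lt_succ_iff.mp (by simpa using hk)
      simp [List.takeWhile, ha, this]

-- the adjusted find result equals the length of the takeWhile (≠ c) prefix
theorem find_adj_eq (c : Char) (s : List Char) :
    (if PySem.Chars.find s [c] = -1 then (s.length : Int) else PySem.Chars.find s [c])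
      = ((s.takeWhile (fun x => x != c)).length : Int) := by
  by_cases h : PySem.Chars.find s [c] = -1
  · simp only [h, if_true]
    have hni : ¬ [c] <:+: s := (PySem.Chars.find_eq_neg_one_iff s [c]).mp h
    have hcm : c ∉ s := by
      intro hc
      obtain ⟨p, t, rfl⟩ := List.append_of_mem hc
      exact hni ⟨p, t, by simp⟩
    have : s.takeWhile (fun x => x != c) = s := by
      rw [List.takeWhile_eq_self_iff]
      intro x hx
      simp only [bne_iff_ne, ne_eq]
      rintro rfl
      exact hcm hx
    rw [this]
  · simp only [h, if_false]
    have hpos : 0 ≤ PySem.Chars.find s [c] := by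
      have := PySem.Chars.neg_one_le_find s [c]
      omega
    obtain ⟨hpre, hmin⟩ := PySem.Chars.find_spec hpos
    set k := (PySem.Chars.find s [c]).toNat with hkdef
    have hk : s[k]? = some c := by
      have := (singleton_prefix_iff c (s.drop k)).mp hpre
      rwa [List.head?_drop] at this
    have hklen : k < s.length := by
      by_contra hge
      rw [List.getElem?_eq_none (by omega)] at hk
      simp at hk
    have : (s.takeWhile (fun x => x != c)).length = k := by
      apply tw_len
      · intro i hi x hx
        have hni := hmin i hi
        rw [singleton_prefix_iff, List.head?_drop] at hni
        simp [bne]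
        intro hxc
        exact hni (by rw [hx, hxc])
      · intro x hx
        rw [hk] at hx
        simp at hx
        simp [hx, bne]
      · omega
    rw [this, hkdef]
    omega

theorem tw_min (c1 c2 : Char) (s : List Char) :
    min (s.takeWhile (fun x => x != c1)).length (s.takeWhile (fun x => x != c2)).length
      = (s.takeWhile (fun x => (x != c1) && (x != c2))).length := by
  induction s with
  | nil => rfl
  | cons a t ih =>
    by_cases h1 : (a != c1) = true
    · by_cases h2 : (a != c2) = true
      · simp [List.takeWhile, h1, h2]
        omega
      · simp at h2; simp [List.takeWhile, h2]
    · simp at h1; simp [List.takeWhile, h1]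

theorem take_takeWhile_len (q : Char → Bool) (s : List Char) :
    s.take (s.takeWhile q).length = s.takeWhile q := by
  induction s with
  | nil => rfl
  | cons a t ih =>
    by_cases h : q a
    · simp [List.takeWhile, h, ih]
    · simp [List.takeWhile, h]

-- ===== VERDICT (by name: the statement is the Claim_ definition above) =====
theorem fix_timestamp_spec : Claim_equal_fix_timestamp := by
  intro ts _ _
  unfold Spec_fix_timestamp fix_timestamp fix_timestamp_alt
  rw [fixLoopA_eq]
  simp only [PySem.Str.find_eq, PySem.Str.len_eq, List.nil_append, PySem.Int.ofStr?]
  rw [show ("." : String).toList = ['.'] from rfl, show ("\n" : String).toList = ['\n'] from rfl]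
  rw [find_adj_eq '.' ts.toList, find_adj_eq '\n' ts.toList]
  rw [← Nat.cast_min, tw_min]
  rw [PySem.Str.toList_slice]
  rw [show ∀ (l : List Char) a b, PySem.Chars.slice l a b = PySem.List.slice l a b from fun _ _ _ => rfl]
  rw [PySem.List.slice_to_natCast, take_takeWhile_len]
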